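-- pv_equiv track=rewrite | github.com/GoodAlex223/practice | Euler_project/E30_Digit_fifth_powers.py | digit_nth_powers_ver2
-- ===== SOURCE A (Python) =====
-- from itertools import combinations_with_replacement
--
-- def digit_nth_powers_ver2(power: int = 5) -> int:
--     """Sum of powers of 120 is equal to sum of powers of 210 and is, for example, 2**10 + 1**10 + 0**10 = 1025.
--     And if sum of powers of 1025 is equal to 1025 this number adds to result.
--     This facts allow us to reduce the amount of iterable numbers from
--     power * 9**power[Link1]* to
--     math.factorial(10 + 4 - 1)/(math.factorial(4) * math.factorial(10 - 1))[Link2],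
--     where 10 is len('0123456789')
--     For example (power = 4):
--     4 * 9**4 == 26244
--     Formula of combination_with_replacement == 715
--     (except for 5 and 7 powers(for the 5th and 7th power + 1),
--     because their sum of powers are very close to the border,
--     and are not processed by this algorithm)
--     For creating combinations of unique numbers uses itertools module
--     *Links 1, 3, 4 are available for users that solved this problem
--     [Link1: https://projecteuler.net/action=redirect;post_id=475]
--     [Link2: https://www.tutorialspoint.com/statistics/combination_with_replacement.htm]
--     Thanks to
--     [Link3: https://projecteuler.net/action=redirect;post_id=3010]
--     [Link4: https://projecteuler.net/action=redirect;post_id=6010]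
--     for this idea"""
--     # result = []  # If u need a list of numbers uncomment such lines and comment others
--     result = 0
--     pows_dict = {str(j): j**power for j in range(10)}
--     if power == 5 or power == 7:  # Numbers that equal to their sum of pows for 5 and 7 are very
--         power += 1                # are very close to the border, and are not processed by this algorithm
--     # Next expression need to generates numbers with unique signs
--     # To reduce the number of unnecessary iterations
--     for j in combinations_with_replacement('0123456789', power):
--         number = sum(pows_dict[x] for x in j)
--         if sum(pows_dict[n] for n in str(number)) == number:
--             # result.append(number)
--             result += number
--     # result.sort()
--     # return result[2:], sum(result) - 1  # List includes 0 and 1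
--     return result - 1
-- ===== SOURCE B (Python) =====
-- def digit_nth_powers_ver2(power: int = 5) -> int:
--     """Same result as A, but enumerates digit multisets by a count recursion
--     (choose how many copies of each digit 0..9 to use) instead of itertools
--     combinations_with_replacement, accumulating the power-sum incrementally."""
--     pows_dict = {str(j): j**power for j in range(10)}
--     length = power + 1 if power == 5 or power == 7 else power
--
--     def check(number):
--         return sum(pows_dict[c] for c in str(number)) == number
--
--     def go(ds, k, s):
--         # distribute k remaining digit slots among the digits ds; s = power-sum so far
--         d, *rest = ds
--         if not rest:
--             n = s + k * pows_dict[str(d)]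
--             return n if check(n) else 0
--         total = 0
--         for c in range(k + 1):
--             total += go(rest, k - c, s + c * pows_dict[str(d)])
--         return total
--
--     return go(list(range(10)), length, 0) - 1
-- ===== Notes on version B (the rewrite author's own statement) =====
-- stated objective: alternative
-- what changed: Replaces the itertools.combinations_with_replacement enumeration of digit tuples by a recursive per-digit count distribution (choose how many copies of each digit 0..9) that accumulates the power-sum incrementally instead of rebuilding it per tuple.
import Mathlib
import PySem

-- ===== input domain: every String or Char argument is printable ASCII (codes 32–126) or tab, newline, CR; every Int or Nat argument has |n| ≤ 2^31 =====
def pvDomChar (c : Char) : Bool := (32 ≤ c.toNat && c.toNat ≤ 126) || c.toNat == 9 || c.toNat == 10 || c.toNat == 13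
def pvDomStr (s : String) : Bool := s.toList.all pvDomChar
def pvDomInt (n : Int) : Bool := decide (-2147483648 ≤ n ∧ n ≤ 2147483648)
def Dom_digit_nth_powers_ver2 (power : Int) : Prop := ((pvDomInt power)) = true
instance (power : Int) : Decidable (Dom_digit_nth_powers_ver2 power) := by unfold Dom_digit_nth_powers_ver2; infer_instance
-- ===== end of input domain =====

-- B replaces itertools.combinations_with_replacement by a per-digit count recursion that
-- accumulates the power-sum incrementally (objective: alternative, same combinatorial cost).

-- ===== PORT A =====
-- {str(j): j**power for j in range(10)}  (shared by both ports: both Pythons build this exact dict)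
def pvPows (power : Int) : PySem.Dict String Int :=
  (PySem.List.pyRange 0 10 1).foldl
    (fun d j => d.insert (PySem.Int.toStr j) (j ^ power.toNat)) PySem.Dict.empty

-- pows_dict[key]; every key actually looked up is '0'..'9', so Python's KeyError never fires
def pvLook (power : Int) (key : String) : Int := ((pvPows power).get? key).getD 0

-- sum(pows_dict[n] for n in str(number))  (appears verbatim in A and in B's `check`)
def pvDigitPowSum (power n : Int) : Int :=
  (PySem.Int.toStr n).toList.foldl (fun acc c => acc + pvLook power (String.mk [c])) 0

-- port of itertools.combinations_with_replacement(pool, r): lexicographic list of multisets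
def pvCwr (pool : List Char) (r : Nat) : List (List Char) :=
  match r, pool with
  | 0, _ => [[]]
  | _ + 1, [] => []
  | r + 1, x :: xs => ((pvCwr (x :: xs) r).map (fun t => x :: t)) ++ pvCwr xs (r + 1)
termination_by (r, pool.length)

def digit_nth_powers_ver2 (power : Int) : Int :=
  let power2 : Int := if power = 5 ∨ power = 7 then power + 1 else power
  ((pvCwr "0123456789".toList power2.toNat).foldl
    (fun result j =>
      let number := j.foldl (fun acc x => acc + pvLook power (String.mk [x])) 0
      if pvDigitPowSum power number = number then result + number else result)
    0) - 1

-- ===== PORT B =====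
-- go(ds, k, s): distribute k digit slots among digits ds, s = power-sum so far
def pvGo (power : Int) : List Int → Nat → Int → Int
  | [], _, _ => 0      -- unreachable: Python's `d, *rest = ds` would raise on an empty list
  | [d], k, s =>
      let n := s + (k : Int) * pvLook power (PySem.Int.toStr d)
      if pvDigitPowSum power n = n then n else 0
  | d :: d' :: rest, k, s =>
      (List.range (k + 1)).foldl
        (fun total c =>
          total + pvGo power (d' :: rest) (k - c) (s + (c : Int) * pvLook power (PySem.Int.toStr d)))
        0

def digit_nth_powers_ver2_alt (power : Int) : Int :=
  let length : Int := if power = 5 ∨ power = 7 then power + 1 else power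
  pvGo power (PySem.List.pyRange 0 10 1) length.toNat 0 - 1

-- ===== PRECONDITION & SPEC =====
-- Pre_ excludes power < 0, where Python raises ZeroDivisionError (zero to a negative power) while building the dict.
def Pre_digit_nth_powers_ver2 (power : Int) : Prop := 0 ≤ power
instance (power : Int) : Decidable (Pre_digit_nth_powers_ver2 power) := by
  unfold Pre_digit_nth_powers_ver2; infer_instance

def pvWitness_digit_nth_powers_ver2 : Int := 4

def Spec_digit_nth_powers_ver2 (power : Int) (out : Int) : Prop := out = digit_nth_powers_ver2_alt power
instance (power : Int) (out : Int) : Decidable (Spec_digit_nth_powers_ver2 power out) := by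
  unfold Spec_digit_nth_powers_ver2; infer_instance

-- ===== CLAIM (what is proved, stated in full; the proofs are below) =====
def Claim_equal_digit_nth_powers_ver2 : Prop :=
  ∀ (power : Int), Dom_digit_nth_powers_ver2 power → Pre_digit_nth_powers_ver2 power →
    Spec_digit_nth_powers_ver2 power (digit_nth_powers_ver2 power)

-- ===== LEMMAS AND PROOFS =====

-- value of one combination after prefix power-sum s
def pvWsum (power : Int) (j : List Char) : Int :=
  (j.map (fun x => pvLook power (String.mk [x]))).sum

def pvG (power s : Int) (j : List Char) : Int :=
  if pvDigitPowSum power (s + pvWsum power j) = s + pvWsum power j then s + pvWsum power j else 0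

theorem pvWsum_cons (power : Int) (x : Char) (j : List Char) :
    pvWsum power (x :: j) = pvLook power (String.mk [x]) + pvWsum power j := by
  simp [pvWsum]

theorem pvWsum_replicate (power : Int) (r : Nat) (x : Char) :
    pvWsum power (List.replicate r x) = (r : Int) * pvLook power (String.mk [x]) := by
  simp [pvWsum, List.map_replicate, List.sum_replicate]

theorem pvG_cons (power s : Int) (x : Char) (j : List Char) :
    pvG power s (x :: j) = pvG power (s + pvLook power (String.mk [x])) j := by
  simp only [pvG, pvWsum_cons, add_assoc]

-- A's outer loop as a sum of per-combination contributions
theorem pv_foldl_if (l : List (List Char)) (C : List Char → Prop) [DecidablePred C]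
    (v : List Char → Int) (a : Int) :
    l.foldl (fun res j => if C j then res + v j else res) a
      = a + (l.map (fun j => if C j then v j else 0)).sum := by
  have h : (fun (res : Int) (j : List Char) => if C j then res + v j else res)
      = fun res j => res + (if C j then v j else 0) := by
    funext res j; split_ifs <;> simp
  rw [h, PySem.List.foldl_add]

theorem pvCwr_singleton (x : Char) (r : Nat) : pvCwr [x] r = [List.replicate r x] := by
  induction r with
  | zero => rw [pvCwr]; rfl
  | succ r ih => rw [pvCwr, ih, pvCwr]; simp [List.replicate_succ]

-- the ten digit positions: chars, ints, and the key correspondence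
def pvDC : List Char := "0123456789".toList
def pvDI : List Int := PySem.List.pyRange 0 10 1

theorem pv_step (i : Nat) (h : i < 9) :
    pvDC.drop i = (Char.ofNat (48 + i)) :: pvDC.drop (i + 1)
    ∧ pvDI.drop i = (i : Int) :: pvDI.drop (i + 1)
    ∧ String.mk [Char.ofNat (48 + i)] = PySem.Int.toStr (i : Int) := by
  interval_cases i <;> exact ⟨rfl, by decide, by decide⟩

theorem pv_last : pvDC.drop 9 = ['9'] ∧ pvDI.drop 9 = [(9 : Int)]
    ∧ String.mk ['9'] = PySem.Int.toStr (9 : Int) := by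
  refine ⟨rfl, by decide, by decide⟩

theorem pv_di_ne_nil (j : Nat) (h : j ≤ 9) : pvDI.drop j ≠ [] := by
  intro hnil
  have hlen : pvDI.length = 10 := by decide
  have := congrArg List.length hnil
  simp [List.length_drop, hlen] at this
  omega

-- peel the count c = 0 off B's count loop
theorem pvGo_step (power d y : Int) (ys : List Int) (k : Nat) (s : Int) :
    pvGo power (d :: y :: ys) (k + 1) s
      = pvGo power (y :: ys) (k + 1) s
        + pvGo power (d :: y :: ys) k (s + pvLook power (PySem.Int.toStr d)) := by
  conv_lhs => rw [pvGo]
  conv_rhs => rw [pvGo]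
  rw [PySem.List.foldl_add, PySem.List.foldl_add, List.range_succ_eq_map, List.map_cons,
    List.sum_cons, List.map_map]
  simp only [Nat.cast_zero, zero_mul, add_zero, Nat.sub_zero, zero_add]
  congr 1
  refine congrArg List.sum (List.map_congr_left ?_)
  intro c _
  simp only [Function.comp, Nat.succ_sub_succ]
  congr 1
  push_cast
  ring

-- MAIN: the sum of A's contributions over all multisets from digit i on
-- equals B's count recursion from digit i on
theorem pv_main (power : Int) (r i : Nat) (h : i ≤ 9) (s : Int) :
    ((pvCwr (pvDC.drop i) r).map (pvG power s)).sum = pvGo power (pvDI.drop i) r s := by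
  by_cases h9 : i = 9
  · subst h9
    obtain ⟨hc, hd, hk⟩ := pv_last
    rw [hc, hd, pvCwr_singleton]
    simp only [List.map_cons, List.map_nil, List.sum_cons, List.sum_nil, add_zero,
      pvG, pvWsum_replicate, pvGo, hk]
  · have hi : i < 9 := lt_of_le_of_ne h h9
    obtain ⟨hc, hd, hk⟩ := pv_step i hi
    cases hys : pvDI.drop (i + 1) with
    | nil => exact absurd hys (pv_di_ne_nil (i + 1) (by omega))
    | cons y ys =>
      cases r with
      | zero =>
          have ih := pv_main power 0 (i + 1) (by omega) s
          rw [hd, hys, pvGo]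
          simp only [List.range_one, List.foldl_cons, List.foldl_nil, Nat.cast_zero, zero_mul,
            add_zero, zero_add, Nat.sub_zero]
          rw [← hys, ← ih, pvCwr, pvCwr]
      | succ r' =>
          have ihr := pv_main power r' i h (s + pvLook power (String.mk [Char.ofNat (48 + i)]))
          have ihi := pv_main power (r' + 1) (i + 1) (by omega) s
          rw [hc, pvCwr, List.map_append, List.sum_append, List.map_map, ← hc]
          have hfst : (pvCwr (pvDC.drop i) r').map (pvG power s ∘ (fun t => Char.ofNat (48 + i) :: t))
              = (pvCwr (pvDC.drop i) r').map (pvG power (s + pvLook power (String.mk [Char.ofNat (48 + i)]))) := by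
            apply List.map_congr_left; intro j _
            simp only [Function.comp, pvG_cons]
          rw [hfst, ihr, ihi, hd, hys, pvGo_step, hk]
          ring
termination_by r * 10 + (9 - i)
decreasing_by all_goals omega

-- ===== VERDICT (by name: the statement is the Claim_ definition above) =====
theorem digit_nth_powers_ver2_spec : Claim_equal_digit_nth_powers_ver2 := by
  intro power _ _
  show digit_nth_powers_ver2 power = digit_nth_powers_ver2_alt power
  simp only [digit_nth_powers_ver2, digit_nth_powers_ver2_alt]
  have hmain := pv_main power (if power = 5 ∨ power = 7 then power + 1 else power).toNat 0 (by omega) 0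
  simp only [List.drop_zero, pvDC, pvDI] at hmain
  rw [pv_foldl_if _ (fun j => pvDigitPowSum power
        (j.foldl (fun acc x => acc + pvLook power (String.mk [x])) 0)
      = j.foldl (fun acc x => acc + pvLook power (String.mk [x])) 0), zero_add]
  rw [← hmain]
  congr 1
  refine congrArg List.sum (List.map_congr_left ?_)
  intro j _
  have hw : j.foldl (fun acc x => acc + pvLook power (String.mk [x])) 0 = pvWsum power j := by
    rw [PySem.List.foldl_add, zero_add]; rfl
  simp only [pvG, hw, zero_add]
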